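-- pv_equiv track=rewrite | github.com/codePascal/nfl_fantasy | tools/project_points.py | map_names
-- ===== SOURCE A (Python) =====
-- def map_names(names):
--     unique_names = dict()
--     id_ = 0
--     for name in names:
--         if name not in unique_names.keys():
--             unique_names[name] = id_
--             id_ += 1
--     return unique_names
-- ===== SOURCE B (Python) =====
-- def map_names(names):
--     result = {}
--     while names:
--         head = names[0]
--         result[head] = len(result)
--         names = [n for n in names if n != head]
--     return result
-- ===== Notes on version B (the rewrite author's own statement) =====
-- stated objective: alternative
-- what changed: B replaces A's single fused pass (dict membership test plus running counter) by iterated peeling: each round assigns the current head the next id (len(result)) and filters every occurrence of it out of the remaining list, so no membership test or counter variable is needed.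
import Mathlib
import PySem

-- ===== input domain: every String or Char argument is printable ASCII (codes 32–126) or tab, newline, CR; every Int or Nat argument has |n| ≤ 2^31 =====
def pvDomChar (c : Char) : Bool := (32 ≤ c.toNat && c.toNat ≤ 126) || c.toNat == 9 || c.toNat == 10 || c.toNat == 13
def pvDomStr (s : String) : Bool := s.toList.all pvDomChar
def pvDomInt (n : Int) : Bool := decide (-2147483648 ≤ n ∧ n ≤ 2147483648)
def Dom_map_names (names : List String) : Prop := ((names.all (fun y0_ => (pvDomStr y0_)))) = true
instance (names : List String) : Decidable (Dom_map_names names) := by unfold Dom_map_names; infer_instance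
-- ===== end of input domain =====

-- B solves the task by iterated peeling instead of A's fused counting loop: each round the
-- head name gets the next id and all its occurrences are filtered out (same values; no speed claim).

-- ===== PORT A =====
-- A: one fused loop over names maintaining a dict and a running counter id_.
def map_names (names : List String) : List (String × Int) :=
  (names.foldl
    (fun (st : PySem.Dict String Int × Int) name =>
      if st.1.keys.contains name then st else (st.1.insert name st.2, st.2 + 1))
    (PySem.Dict.empty, 0)).1.items

-- ===== PORT B =====
-- B: while names: head = names[0]; result[head] = len(result); names = [n for n in names if n != head]
-- the while loop becomes structural recursion on the shrinking names list, carrying result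
def mapNamesPeel : List String → PySem.Dict String Int → List (String × Int)
  | [], result => result.items
  | head :: t, result =>
      mapNamesPeel ((head :: t).filter (fun n => n != head))
        (result.insert head (result.size : Int))
  termination_by names _ => names.length
  decreasing_by
    simp only [List.filter_cons, bne_self_eq_false, Bool.false_eq_true, if_false, List.length_cons]
    exact Nat.lt_succ_of_le (List.length_filter_le _ _)

def map_names_alt (names : List String) : List (String × Int) :=
  mapNamesPeel names PySem.Dict.empty

-- ===== PRECONDITION & SPEC =====
def Spec_map_names (names : List String) (out : List (String × Int)) : Prop := out = map_names_alt names
instance (names : List String) (out : List (String × Int)) : Decidable (Spec_map_names names out) := by unfold Spec_map_names; infer_instance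

-- ===== CLAIM (what is proved, stated in full; the proofs are below) =====
def Claim_equal_map_names : Prop := ∀ (names : List String), Dom_map_names names → Spec_map_names names (map_names names)

-- ===== LEMMAS AND PROOFS =====

-- the pair list (name, id) for the distinct names u in order
def pvE (u : List String) : List (String × Int) :=
  (PySem.List.enumerate u 0).map (fun p => (p.2, p.1))

-- the dict A has built after seeing exactly the distinct names u (in order)
def pvDictOf (u : List String) : PySem.Dict String Int :=
  PySem.Dict.mk (pvE u)

theorem pvDictOf_keys (u : List String) : (pvDictOf u).keys = u := by
  simp [pvDictOf, pvE, PySem.Dict.keys]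
  exact PySem.List.map_snd_enumerate u 0

theorem pvDictOf_contains (u : List String) (x : String) :
    (pvDictOf u).keys.contains x = u.contains x := by
  rw [pvDictOf_keys]

theorem pvDictOf_snoc (u : List String) (x : String) (hx : x ∉ u) :
    pvDictOf (u ++ [x]) = (pvDictOf u).insert x u.length := by
  apply PySem.Dict.ext
  rw [PySem.Dict.items_insert_of_not_contains]
  · simp only [pvDictOf, pvE, PySem.List.enumerate_append, List.map_append]
    simp [PySem.List.enumerate_cons, PySem.List.enumerate_nil]
  · rw [PySem.Dict.contains_eq_decide_mem_keys, pvDictOf_keys]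
    simpa using hx

theorem pv_loop_inv (names u : List String) :
    (names.foldl
      (fun (st : PySem.Dict String Int × Int) name =>
        if st.1.keys.contains name then st else (st.1.insert name st.2, st.2 + 1))
      (pvDictOf u, (u.length : Int)))
    = (pvDictOf (PySem.Set.update u names), ((PySem.Set.update u names).length : Int)) := by
  induction names generalizing u with
  | nil => simp [PySem.Set.update]
  | cons n rest ih =>
    have hstep : PySem.Set.update u (n :: rest) = PySem.Set.update (PySem.Set.add u n) rest := by
      simp [PySem.Set.update]
    rw [hstep, List.foldl_cons]
    by_cases h : n ∈ u
    · have hc : (pvDictOf u).keys.contains n = true := by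
        rw [pvDictOf_contains]; simpa using h
      have hadd : PySem.Set.add u n = u := by
        simp [PySem.Set.add, h]
      rw [hadd]
      simp only [hc, if_true]
      exact ih u
    · have hc : (pvDictOf u).keys.contains n = false := by
        rw [pvDictOf_contains]; simpa using h
      have hadd : PySem.Set.add u n = u ++ [n] := by
        simp [PySem.Set.add, h]
      rw [hadd]
      have hsnoc := pvDictOf_snoc u n h
      simp only [hc, Bool.false_eq_true, if_false]
      have hlen : ((u ++ [n]).length : Int) = (u.length : Int) + 1 := by
        simp
      rw [← hlen, ← hsnoc]
      exact ih (u ++ [n])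

-- A computes the (name, id) pairs of the ordered distinct names
theorem map_names_eq_pvE (names : List String) :
    map_names names = pvE (PySem.List.dedup names) := by
  have h0 : pvDictOf [] = PySem.Dict.empty := by
    simp [pvDictOf, pvE, PySem.List.enumerate_nil, PySem.Dict.empty]
  have := pv_loop_inv names []
  rw [h0] at this
  simp only [List.length_nil, Nat.cast_zero] at this
  have hup : PySem.Set.update [] names = PySem.List.dedup names := by
    simp [PySem.Set.update, PySem.Set.ofList_eq_foldl]
  unfold map_names
  rw [this, hup]
  rfl

-- adding to a set containing h skips h-occurrences
theorem pv_update_cons (h : String) :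
    ∀ (t s : List String),
      PySem.Set.update (h :: s) t = h :: PySem.Set.update s (t.filter (fun x => x != h)) := by
  intro t
  induction t with
  | nil => intro s; simp [PySem.Set.update]
  | cons x xs ih =>
    intro s
    by_cases hx : x = h
    · subst hx
      have : PySem.Set.add (x :: s) x = x :: s := by
        simp [PySem.Set.add]
      simp only [PySem.Set.update, List.foldl_cons, this, List.filter_cons,
        bne_self_eq_false, Bool.false_eq_true, if_false]
      exact ih s
    · have h1 : PySem.Set.add (h :: s) x = h :: PySem.Set.add s x := by
        by_cases hs : x ∈ s
        · simp [PySem.Set.add, hx, hs]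
        · simp [PySem.Set.add, hx, hs]
      simp only [PySem.Set.update, List.foldl_cons, h1, List.filter_cons]
      have hb : (x != h) = true := by simpa using hx
      rw [hb]
      simp only [if_true, List.foldl_cons]
      exact ih (PySem.Set.add s x)

theorem pv_dedup_cons (h : String) (t : List String) :
    PySem.List.dedup (h :: t) = h :: PySem.List.dedup (t.filter (fun x => x != h)) := by
  have e1 : PySem.List.dedup (h :: t) = PySem.Set.update [h] t := by
    simp [PySem.Set.update, PySem.Set.ofList_eq_foldl, PySem.Set.add]
  have e2 : PySem.List.dedup (t.filter (fun x => x != h))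
      = PySem.Set.update [] (t.filter (fun x => x != h)) := by
    simp [PySem.Set.update, PySem.Set.ofList_eq_foldl]
  rw [e1, e2, pv_update_cons h t []]

-- peeling invariant: with the distinct names u already assigned, the loop appends the rest
theorem pv_peel_inv : ∀ (n : Nat) (names u : List String), names.length = n →
    (∀ x ∈ names, x ∉ u) →
    mapNamesPeel names (pvDictOf u) = pvE (u ++ PySem.List.dedup names) := by
  intro n
  induction n using Nat.strong_induction_on with
  | _ n ih =>
  intro names u hn hdis
  match names with
  | [] =>
    simp only [mapNamesPeel, PySem.List.dedup]
    simp [pvDictOf, PySem.Set.ofList]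
  | h :: t =>
    have hh : h ∉ u := hdis h (by simp)
    have hsize : ((pvDictOf u).size : Int) = (u.length : Int) := by
      simp [pvDictOf, pvE, PySem.Dict.size, PySem.List.length_enumerate]
    have hins : (pvDictOf u).insert h ((pvDictOf u).size : Int) = pvDictOf (u ++ [h]) := by
      rw [hsize, ← pvDictOf_snoc u h hh]
    have hfilt : (h :: t).filter (fun x => x != h) = t.filter (fun x => x != h) := by
      simp
    have hlt : (t.filter (fun x => x != h)).length < n := by
      subst hn
      exact Nat.lt_succ_of_le (List.length_filter_le _ _)
    have hdis' : ∀ x ∈ t.filter (fun y => y != h), x ∉ u ++ [h] := by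
      intro x hx
      have hxt : x ∈ t := List.mem_of_mem_filter hx
      have hxh : x ≠ h := by simpa using List.of_mem_filter hx
      simp only [List.mem_append, List.mem_singleton]
      push Not
      exact ⟨hdis x (by simp [hxt]), hxh⟩
    have := ih _ hlt (t.filter (fun y => y != h)) (u ++ [h]) rfl hdis'
    rw [mapNamesPeel, hins, hfilt, this, pv_dedup_cons]
    simp

-- ===== VERDICT (by name: the statement is the Claim_ definition above) =====
theorem map_names_spec : Claim_equal_map_names := by
  intro names _
  show map_names names = map_names_alt names
  have h0 : pvDictOf [] = PySem.Dict.empty := by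
    simp [pvDictOf, pvE, PySem.List.enumerate_nil, PySem.Dict.empty]
  have := pv_peel_inv names.length names [] rfl (by simp)
  rw [h0] at this
  rw [map_names_eq_pvE, map_names_alt, this]
  simp
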